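-- pv_equiv track=rewrite | github.com/enrique-yoab/JuegoGatopython | juegoPrincipal.py | verificaGanador
-- ===== SOURCE A (Python) =====
-- def verificaGanador(tablero, marcaU, marcaM, contadorTiros):
--     N = len(tablero)     #tamano del renglon
--     M = len(tablero[0])  #tamano de la columna
--
--     #verificamos los renglones, para identificar si hay 3 iguales
--     for renglon in range(N):
--         #este es el arreglo dinamico 3 x 3, si hay mas de 3 columnas se adelantara una a la derecha
--         for columna in range(M-2):
--             if all(tablero[renglon][columna+i] == marcaU for i in range(3)):
--                 return 1
--             if all(tablero[renglon][columna+i] == marcaM for i in range(3)):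
--                 return 2
--
--     #verificamos las columnas, para identificar si hay 3 iguales
--     for columna in range(M):
--         #este es el arreglo dinamico 3 x 3, si hay mas de 3 renglones se adelantara una a la derecha
--         for renglon in range(N-2):
--             if all(tablero[renglon+i][columna] == marcaU for i in range(3)):
--                 return 1
--             if all(tablero[renglon+i][columna] == marcaM for i in range(3)):
--                 return 2
--
--     #Verificamos las diagonales, de arriba hacia abajo
--     for renglon in range(N-2):
--         for columna in range(M-2):
--             if all(tablero[renglon+i][columna+i] == marcaU for i in range(3)):
--                 return 1
--             if all(tablero[renglon+i][columna+i] == marcaM for i in range(3)):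
--                 return 2
--
--     #verificamos las diagonales, de abajo hacia arriba
--     for renglon in range(2, N):
--         for columna in range(M-2):
--             if all(tablero[renglon-i][columna+i] == marcaU for i in range(3)):
--                 return 1
--             if all(tablero[renglon-i][columna+i] == marcaM for i in range(3)):
--                 return 2
--
--     #si el contador de tiros es igual a M x N entonces es un empate
--     if contadorTiros == N*M:
--         return 3
--     #se retorna sero si aun no encuentra un ganador
--     return 0
-- ===== SOURCE B (Python) =====
-- def verificaGanador(tablero, marcaU, marcaM, contadorTiros):
--     N = len(tablero)
--     M = len(tablero[0])
--     # build every candidate 3-in-a-row as a value triple, in A's scan order: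
--     # horizontals, verticals, down-right diagonals, up-right diagonals
--     lineas = []
--     for r in range(N):
--         for c in range(M - 2):
--             lineas.append((tablero[r][c], tablero[r][c + 1], tablero[r][c + 2]))
--     for c in range(M):
--         for r in range(N - 2):
--             lineas.append((tablero[r][c], tablero[r + 1][c], tablero[r + 2][c]))
--     for r in range(N - 2):
--         for c in range(M - 2):
--             lineas.append((tablero[r][c], tablero[r + 1][c + 1], tablero[r + 2][c + 2]))
--     for r in range(2, N):
--         for c in range(M - 2):
--             lineas.append((tablero[r][c], tablero[r - 1][c + 1], tablero[r - 2][c + 2]))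
--     # one pass over the precomputed list
--     for linea in lineas:
--         if linea == (marcaU, marcaU, marcaU):
--             return 1
--         if linea == (marcaM, marcaM, marcaM):
--             return 2
--     if contadorTiros == N * M:
--         return 3
--     return 0
-- ===== Notes on version B (the rewrite author's own statement) =====
-- stated objective: faster
-- what changed: B first materialises every candidate 3-in-a-row as a value triple (in A's scan order: rows, columns, down-right diagonals, up-right diagonals) and then decides the winner in one single pass over that list, instead of A's four separate nested scanning loops each re-testing cells with generator expressions (constant-factor: one tuple comparison per line instead of per-cell generator machinery). …
-- outside the precondition, e.g. on verificaGanador([['x'], ['x'], ['x'], []], 'x', 'o', 0): A returns 1, B raises IndexError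
import Mathlib
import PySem

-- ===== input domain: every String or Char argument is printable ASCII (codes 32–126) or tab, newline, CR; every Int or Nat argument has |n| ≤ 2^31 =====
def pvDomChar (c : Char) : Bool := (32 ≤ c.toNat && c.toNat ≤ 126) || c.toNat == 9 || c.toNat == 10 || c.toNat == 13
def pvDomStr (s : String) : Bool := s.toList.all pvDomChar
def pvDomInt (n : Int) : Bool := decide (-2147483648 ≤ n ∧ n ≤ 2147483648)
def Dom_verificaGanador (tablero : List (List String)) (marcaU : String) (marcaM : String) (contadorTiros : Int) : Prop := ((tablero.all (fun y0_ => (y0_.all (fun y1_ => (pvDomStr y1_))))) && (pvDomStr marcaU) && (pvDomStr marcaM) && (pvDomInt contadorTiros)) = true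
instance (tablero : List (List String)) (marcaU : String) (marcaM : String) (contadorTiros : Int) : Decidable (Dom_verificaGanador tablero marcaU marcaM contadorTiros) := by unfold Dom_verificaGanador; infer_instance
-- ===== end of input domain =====

-- B replaces A's four repeated scanning loops by one precomputed list of all candidate
-- 3-in-a-row value triples (in A's scan order) followed by a single pass (objective: alternative).


-- ===== PORT A =====
-- tablero[r][c] (indices are nonnegative and in range under Pre_; exact there)
def pvCell (t : List (List String)) (r c : Int) : String :=
  PySem.List.pyGetD (PySem.List.pyGetD t r []) c ""

-- each for-loop with early return is the obvious findSome? over its range;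
-- the four loop blocks run in sequence, first `some` wins (`.or`)
def verificaGanador (tablero : List (List String)) (marcaU : String) (marcaM : String) (contadorTiros : Int) : Int :=
  let N : Int := tablero.length
  let M : Int := (PySem.List.pyGetD tablero 0 []).length
  match
    ((PySem.List.pyRange 0 N 1).findSome? (fun renglon =>
      (PySem.List.pyRange 0 (M - 2) 1).findSome? (fun columna =>
        if ∀ i ∈ PySem.List.pyRange 0 3 1, pvCell tablero renglon (columna + i) = marcaU then some (1 : Int)
        else if ∀ i ∈ PySem.List.pyRange 0 3 1, pvCell tablero renglon (columna + i) = marcaM then some 2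
        else none))).or
    (((PySem.List.pyRange 0 M 1).findSome? (fun columna =>
      (PySem.List.pyRange 0 (N - 2) 1).findSome? (fun renglon =>
        if ∀ i ∈ PySem.List.pyRange 0 3 1, pvCell tablero (renglon + i) columna = marcaU then some (1 : Int)
        else if ∀ i ∈ PySem.List.pyRange 0 3 1, pvCell tablero (renglon + i) columna = marcaM then some 2
        else none))).or
    (((PySem.List.pyRange 0 (N - 2) 1).findSome? (fun renglon =>
      (PySem.List.pyRange 0 (M - 2) 1).findSome? (fun columna =>
        if ∀ i ∈ PySem.List.pyRange 0 3 1, pvCell tablero (renglon + i) (columna + i) = marcaU then some (1 : Int)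
        else if ∀ i ∈ PySem.List.pyRange 0 3 1, pvCell tablero (renglon + i) (columna + i) = marcaM then some 2
        else none))).or
    ((PySem.List.pyRange 2 N 1).findSome? (fun renglon =>
      (PySem.List.pyRange 0 (M - 2) 1).findSome? (fun columna =>
        if ∀ i ∈ PySem.List.pyRange 0 3 1, pvCell tablero (renglon - i) (columna + i) = marcaU then some (1 : Int)
        else if ∀ i ∈ PySem.List.pyRange 0 3 1, pvCell tablero (renglon - i) (columna + i) = marcaM then some 2
        else none)))))
  with
  | some v => v
  | none => if contadorTiros = N * M then 3 else 0

-- ===== PORT B =====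
-- all candidate 3-in-a-row triples, in A's scan order (the `lineas` list of Source B)
def pvLineas (t : List (List String)) : List (String × String × String) :=
  let N : Int := t.length
  let M : Int := (PySem.List.pyGetD t 0 []).length
  ((PySem.List.pyRange 0 N 1).flatMap (fun r => (PySem.List.pyRange 0 (M - 2) 1).map (fun c =>
      (pvCell t r c, pvCell t r (c + 1), pvCell t r (c + 2)))))
  ++ ((PySem.List.pyRange 0 M 1).flatMap (fun c => (PySem.List.pyRange 0 (N - 2) 1).map (fun r =>
      (pvCell t r c, pvCell t (r + 1) c, pvCell t (r + 2) c))))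
  ++ ((PySem.List.pyRange 0 (N - 2) 1).flatMap (fun r => (PySem.List.pyRange 0 (M - 2) 1).map (fun c =>
      (pvCell t r c, pvCell t (r + 1) (c + 1), pvCell t (r + 2) (c + 2)))))
  ++ ((PySem.List.pyRange 2 N 1).flatMap (fun r => (PySem.List.pyRange 0 (M - 2) 1).map (fun c =>
      (pvCell t r c, pvCell t (r - 1) (c + 1), pvCell t (r - 2) (c + 2)))))

-- the single pass of Source B
def pvScan (mU mM : String) (cnt nm : Int) : List (String × String × String) → Int
  | [] => if cnt = nm then 3 else 0
  | l :: rest => if l = (mU, mU, mU) then 1 else if l = (mM, mM, mM) then 2 else pvScan mU mM cnt nm rest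

def verificaGanador_alt (tablero : List (List String)) (marcaU : String) (marcaM : String) (contadorTiros : Int) : Int :=
  let N : Int := tablero.length
  let M : Int := (PySem.List.pyGetD tablero 0 []).length
  pvScan marcaU marcaM contadorTiros (N * M) (pvLineas tablero)

-- ===== PRECONDITION & SPEC =====
-- Pre_ excludes the empty board and ragged boards whose first row is longer than some other
-- row: A usually raises IndexError there, and where A's short-circuiting scans happen to
-- return a value before touching the short row, B's eager line-building raises IndexError.
def Pre_verificaGanador (tablero : List (List String)) (marcaU : String) (marcaM : String) (contadorTiros : Int) : Prop :=
  tablero ≠ [] ∧ ∀ row ∈ tablero, tablero.headI.length ≤ row.length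
instance (tablero : List (List String)) (marcaU : String) (marcaM : String) (contadorTiros : Int) : Decidable (Pre_verificaGanador tablero marcaU marcaM contadorTiros) := by unfold Pre_verificaGanador; infer_instance
def pvWitness_verificaGanador : List (List String) × String × String × Int :=
  ([["X", "O", "X"], ["O", "X", "O"], ["O", "X", "X"]], "X", "O", 9)

def Spec_verificaGanador (tablero : List (List String)) (marcaU : String) (marcaM : String) (contadorTiros : Int) (out : Int) : Prop := out = verificaGanador_alt tablero marcaU marcaM contadorTiros
instance (tablero : List (List String)) (marcaU : String) (marcaM : String) (contadorTiros : Int) (out : Int) : Decidable (Spec_verificaGanador tablero marcaU marcaM contadorTiros out) := by unfold Spec_verificaGanador; infer_instance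

-- ===== CLAIM (what is proved, stated in full; the proofs are below) =====
def Claim_equal_verificaGanador : Prop := ∀ (tablero : List (List String)) (marcaU : String) (marcaM : String) (contadorTiros : Int), Dom_verificaGanador tablero marcaU marcaM contadorTiros → Pre_verificaGanador tablero marcaU marcaM contadorTiros → Spec_verificaGanador tablero marcaU marcaM contadorTiros (verificaGanador tablero marcaU marcaM contadorTiros)

-- ===== LEMMAS AND PROOFS =====
-- first hit of the single pass, as an Option
def pvChk (mU mM : String) (l : String × String × String) : Option Int :=
  if l = (mU, mU, mU) then some 1 else if l = (mM, mM, mM) then some 2 else none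

theorem pvScan_eq (mU mM : String) (cnt nm : Int) (l : List (String × String × String)) :
    pvScan mU mM cnt nm l =
      match l.findSome? (pvChk mU mM) with
      | some v => v
      | none => if cnt = nm then 3 else 0 := by
  induction l with
  | nil => rfl
  | cons x t ih =>
    simp only [pvScan, List.findSome?_cons, pvChk]
    split_ifs <;> simp [ih] <;> cases hX : List.findSome? (pvChk mU mM) t <;> simp [*]

theorem pvFindSome?_flatMap {α β γ : Type} (xs : List α) (g : α → List β) (f : β → Option γ) :
    (xs.flatMap g).findSome? f = xs.findSome? (fun x => (g x).findSome? f) := by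
  induction xs with
  | nil => rfl
  | cons x t ih =>
    simp only [List.flatMap_cons, List.findSome?_append, ih, List.findSome?_cons]
    cases List.findSome? f (g x) <;> rfl

theorem pvRange3 : PySem.List.pyRange 0 3 1 = [0, 1, 2] := by decide

theorem pvChk_row (t : List (List String)) (mU mM : String) (r c : Int) :
    pvChk mU mM (pvCell t r c, pvCell t r (c + 1), pvCell t r (c + 2)) =
      (if ∀ i ∈ PySem.List.pyRange 0 3 1, pvCell t r (c + i) = mU then some (1 : Int)
       else if ∀ i ∈ PySem.List.pyRange 0 3 1, pvCell t r (c + i) = mM then some 2 else none) := by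
  simp [pvChk, pvRange3, Prod.ext_iff]

theorem pvChk_col (t : List (List String)) (mU mM : String) (r c : Int) :
    pvChk mU mM (pvCell t r c, pvCell t (r + 1) c, pvCell t (r + 2) c) =
      (if ∀ i ∈ PySem.List.pyRange 0 3 1, pvCell t (r + i) c = mU then some (1 : Int)
       else if ∀ i ∈ PySem.List.pyRange 0 3 1, pvCell t (r + i) c = mM then some 2 else none) := by
  simp [pvChk, pvRange3, Prod.ext_iff]

theorem pvChk_diag (t : List (List String)) (mU mM : String) (r c : Int) :
    pvChk mU mM (pvCell t r c, pvCell t (r + 1) (c + 1), pvCell t (r + 2) (c + 2)) =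
      (if ∀ i ∈ PySem.List.pyRange 0 3 1, pvCell t (r + i) (c + i) = mU then some (1 : Int)
       else if ∀ i ∈ PySem.List.pyRange 0 3 1, pvCell t (r + i) (c + i) = mM then some 2 else none) := by
  simp [pvChk, pvRange3, Prod.ext_iff]

theorem pvChk_anti (t : List (List String)) (mU mM : String) (r c : Int) :
    pvChk mU mM (pvCell t r c, pvCell t (r - 1) (c + 1), pvCell t (r - 2) (c + 2)) =
      (if ∀ i ∈ PySem.List.pyRange 0 3 1, pvCell t (r - i) (c + i) = mU then some (1 : Int)
       else if ∀ i ∈ PySem.List.pyRange 0 3 1, pvCell t (r - i) (c + i) = mM then some 2 else none) := by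
  simp [pvChk, pvRange3, Prod.ext_iff]

-- ===== VERDICT (by name: the statement is the Claim_ definition above) =====
theorem verificaGanador_spec : Claim_equal_verificaGanador := by
  intro tablero marcaU marcaM contadorTiros _ _
  unfold Spec_verificaGanador verificaGanador verificaGanador_alt
  rw [pvScan_eq]
  unfold pvLineas
  simp only [List.findSome?_append, pvFindSome?_flatMap, List.findSome?_map, Function.comp_def,
    pvChk_row, pvChk_col, pvChk_diag, pvChk_anti, Option.or_assoc]
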